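-- pv_equiv track=rewrite | github.com/msaad00/agent-bom | src/agent_bom/cloud/gpu_infra.py | _extract_cuda_versions
-- ===== SOURCE A (Python) =====
-- def _extract_cuda_versions(labels: dict[str, str]) -> tuple[str | None, str | None]:
--     """Extract CUDA and cuDNN versions from container/image labels."""
--     cuda_version: str | None = None
--     cudnn_version: str | None = None
--
--     for key, value in labels.items():
--         key_lower = key.lower()
--         if "cuda" in key_lower and "cudnn" not in key_lower and not cuda_version:
--             cuda_version = value.strip()
--         elif "cudnn" in key_lower and not cudnn_version:
--             cudnn_version = value.strip()
--
--     return cuda_version, cudnn_version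
-- ===== SOURCE B (Python) =====
-- def _extract_cuda_versions(labels: dict[str, str]) -> tuple[str | None, str | None]:
--     """Extract CUDA and cuDNN versions from container/image labels."""
--     cuda_version = next(
--         (v.strip() for k, v in labels.items()
--          if "cuda" in k.lower() and "cudnn" not in k.lower() and v.strip()),
--         None)
--     cudnn_version = next(
--         (v.strip() for k, v in labels.items()
--          if "cudnn" in k.lower() and v.strip()),
--         None)
--     return cuda_version, cudnn_version
-- ===== Notes on version B (the rewrite author's own statement) =====
-- stated objective: alternative
-- what changed: Replaces the single stateful loop with mutable slots and falsy-overwrite logic by two independent next()-over-generator passes, each returning the first non-empty stripped value of a matching label.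
-- intended difference: On inputs where matching cuda (resp. cudnn) labels exist but every matching value strips to the empty string, A returns '' for that slot while B returns None; an empty version string carries no information, so None ('not found') is the intended value. — e.g. on _extract_cuda_versions([("cuda", " ")]): A returns (some "", none), B returns (none, none)
import Mathlib
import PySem

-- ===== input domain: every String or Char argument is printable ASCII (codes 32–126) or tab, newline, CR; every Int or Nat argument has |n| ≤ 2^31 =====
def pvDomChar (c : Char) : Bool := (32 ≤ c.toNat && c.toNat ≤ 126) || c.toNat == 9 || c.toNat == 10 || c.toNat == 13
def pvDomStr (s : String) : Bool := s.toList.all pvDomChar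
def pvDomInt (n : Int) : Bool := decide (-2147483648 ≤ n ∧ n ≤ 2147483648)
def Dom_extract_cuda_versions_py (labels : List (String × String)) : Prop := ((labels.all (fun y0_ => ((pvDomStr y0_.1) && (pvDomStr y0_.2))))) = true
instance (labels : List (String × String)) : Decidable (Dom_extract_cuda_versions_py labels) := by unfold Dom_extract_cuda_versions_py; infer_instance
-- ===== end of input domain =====

-- B replaces A's single stateful loop by two independent first-match scans (alternative decomposition,
-- same cost); where all matching values strip to empty, B returns none instead of A's "".

-- ===== PORT A =====
-- Python truthiness of an Optional[str]: None and "" are falsy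
def pvFalsy : Option String → Bool
  | none => true
  | some s => s == ""

-- one iteration of A's for-loop over (key, value), state = (cuda_version, cudnn_version)
def pvStepA (st : Option String × Option String) (kv : String × String) : Option String × Option String :=
  let key_lower := PySem.Str.lower kv.1
  if PySem.Str.isIn "cuda" key_lower && !(PySem.Str.isIn "cudnn" key_lower) && pvFalsy st.1 then
    (some (PySem.Str.strip kv.2), st.2)
  else if PySem.Str.isIn "cudnn" key_lower && pvFalsy st.2 then
    (st.1, some (PySem.Str.strip kv.2))
  else st

def extract_cuda_versions_py (labels : List (String × String)) : Option String × Option String :=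
  labels.foldl pvStepA (none, none)

-- ===== PORT B =====
def pvIsCudaKey (kv : String × String) : Bool :=
  PySem.Str.isIn "cuda" (PySem.Str.lower kv.1) && !(PySem.Str.isIn "cudnn" (PySem.Str.lower kv.1))

def pvIsCudnnKey (kv : String × String) : Bool :=
  PySem.Str.isIn "cudnn" (PySem.Str.lower kv.1)

-- next((v.strip() for k, v in labels if p(k) and v.strip()), None)
def pvFirstVer (p : String × String → Bool) (labels : List (String × String)) : Option String :=
  (labels.find? (fun kv => p kv && !(PySem.Str.strip kv.2 == ""))).map (fun kv => PySem.Str.strip kv.2)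

def extract_cuda_versions_py_alt (labels : List (String × String)) : Option String × Option String :=
  (pvFirstVer pvIsCudaKey labels, pvFirstVer pvIsCudnnKey labels)

-- ===== PRECONDITION & SPEC =====
-- On inputs where matching cuda (resp. cudnn) labels exist but every matching value strips to the
-- empty string, A returns "" for that slot while B returns none; an empty version string carries no
-- information, so none ('not found') is the intended value.
def D_extract_cuda_versions_py (labels : List (String × String)) : Prop :=
  ((∃ kv ∈ labels, PySem.Str.isIn "cuda" (PySem.Str.lower kv.1) = true ∧
       PySem.Str.isIn "cudnn" (PySem.Str.lower kv.1) = false) ∧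
    ∀ kv ∈ labels, PySem.Str.isIn "cuda" (PySem.Str.lower kv.1) = true →
       PySem.Str.isIn "cudnn" (PySem.Str.lower kv.1) = false → PySem.Str.strip kv.2 = "") ∨
  ((∃ kv ∈ labels, PySem.Str.isIn "cudnn" (PySem.Str.lower kv.1) = true) ∧
    ∀ kv ∈ labels, PySem.Str.isIn "cudnn" (PySem.Str.lower kv.1) = true → PySem.Str.strip kv.2 = "")
instance (labels : List (String × String)) : Decidable (D_extract_cuda_versions_py labels) := by
  unfold D_extract_cuda_versions_py; infer_instance

def Spec_extract_cuda_versions_py (labels : List (String × String)) (out : Option String × Option String) : Prop :=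
  ¬ D_extract_cuda_versions_py labels → out = extract_cuda_versions_py_alt labels
instance (labels : List (String × String)) (out : Option String × Option String) : Decidable (Spec_extract_cuda_versions_py labels out) := by unfold Spec_extract_cuda_versions_py; infer_instance

def pvDiffWitness_extract_cuda_versions_py : (List (String × String)) := [("cuda", " ")]
def pvDiffWitnessOut_extract_cuda_versions_py : (Option String × Option String) × (Option String × Option String) :=
  ((some "", none), (none, none))

-- ===== CLAIM (what is proved, stated in full; the proofs are below) =====
def Claim_unchanged_extract_cuda_versions_py : Prop := ∀ (labels : List (String × String)), Dom_extract_cuda_versions_py labels → Spec_extract_cuda_versions_py labels (extract_cuda_versions_py labels)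
def Claim_changed_extract_cuda_versions_py : Prop := Dom_extract_cuda_versions_py (pvDiffWitness_extract_cuda_versions_py) ∧ D_extract_cuda_versions_py (pvDiffWitness_extract_cuda_versions_py) ∧ extract_cuda_versions_py (pvDiffWitness_extract_cuda_versions_py) = pvDiffWitnessOut_extract_cuda_versions_py.1 ∧ extract_cuda_versions_py_alt (pvDiffWitness_extract_cuda_versions_py) = pvDiffWitnessOut_extract_cuda_versions_py.2 ∧ pvDiffWitnessOut_extract_cuda_versions_py.1 ≠ pvDiffWitnessOut_extract_cuda_versions_py.2
def Claim_exact_extract_cuda_versions_py : Prop := ∀ (labels : List (String × String)), Dom_extract_cuda_versions_py labels → D_extract_cuda_versions_py labels → extract_cuda_versions_py labels ≠ extract_cuda_versions_py_alt labels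

-- ===== LEMMAS AND PROOFS =====

-- what A's loop computes in one slot, from the filtered stripped values
def pvSlotA (l : List String) : Option String :=
  match l.find? (fun s => !(s == "")) with
  | some s => some s
  | none => match l with
            | [] => none
            | _ :: _ => some ""

-- A's loop, resumed from an arbitrary slot value cu
def pvCombine (cu : Option String) (l : List String) : Option String :=
  if pvFalsy cu then
    match l.find? (fun s => !(s == "")) with
    | some s => some s
    | none => match l with
              | [] => cu
              | _ :: _ => some ""
  else cu

theorem pvCombine_nil (cu : Option String) : pvCombine cu [] = cu := by
  rw [pvCombine.eq_def]; cases h : pvFalsy cu <;> simp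

theorem pvCombine_truthy (cu : Option String) (l : List String) (h : pvFalsy cu = false) :
    pvCombine cu l = cu := by
  rw [pvCombine.eq_def, h]; simp

theorem pvCombine_cons_push (cu : Option String) (s : String) (l : List String)
    (h : pvFalsy cu = true) : pvCombine cu (s :: l) = pvCombine (some s) l := by
  by_cases hs : s = ""
  · subst hs
    rw [pvCombine.eq_def, pvCombine.eq_def, h]
    have h2 : pvFalsy (some "") = true := rfl
    rw [h2]
    simp only [if_true, List.find?_cons]
    have h3 : (!("" == "")) = false := rfl
    rw [h3]
    cases hf : List.find? (fun t => !(t == "")) l <;> cases l <;> simp_all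
  · have hs' : (s == "") = false := by simp [hs]
    rw [pvCombine.eq_def, pvCombine.eq_def, h]
    have h2 : pvFalsy (some s) = false := by simp [pvFalsy, hs']
    rw [h2]
    simp [hs']

theorem pvMain (labels : List (String × String)) :
    ∀ (cu cn : Option String),
      labels.foldl pvStepA (cu, cn) =
        (pvCombine cu ((labels.filter pvIsCudaKey).map (fun kv => PySem.Str.strip kv.2)),
         pvCombine cn ((labels.filter pvIsCudnnKey).map (fun kv => PySem.Str.strip kv.2))) := by
  induction labels with
  | nil => intro cu cn; simp [pvCombine_nil]
  | cons hd tl ih =>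
    intro cu cn
    cases hca : PySem.Chars.isIn ['c', 'u', 'd', 'a'] (PySem.Chars.lower hd.1.toList) <;>
      cases hcn : PySem.Chars.isIn ['c', 'u', 'd', 'n', 'n'] (PySem.Chars.lower hd.1.toList)
    · simp [List.foldl_cons, pvStepA, pvIsCudaKey, pvIsCudnnKey, hca, hcn, ih]
    · cases hf : pvFalsy cn
      · simp [List.foldl_cons, pvStepA, pvIsCudaKey, pvIsCudnnKey, hca, hcn, hf,
              ih, pvCombine_truthy _ _ hf]
      · simp [List.foldl_cons, pvStepA, pvIsCudaKey, pvIsCudnnKey, hca, hcn, hf,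
              ih, pvCombine_cons_push _ _ _ hf]
    · cases hf : pvFalsy cu
      · simp [List.foldl_cons, pvStepA, pvIsCudaKey, pvIsCudnnKey, hca, hcn, hf,
              ih, pvCombine_truthy _ _ hf]
      · simp [List.foldl_cons, pvStepA, pvIsCudaKey, pvIsCudnnKey, hca, hcn, hf,
              ih, pvCombine_cons_push _ _ _ hf]
    · cases hf : pvFalsy cn
      · simp [List.foldl_cons, pvStepA, pvIsCudaKey, pvIsCudnnKey, hca, hcn, hf,
              ih, pvCombine_truthy _ _ hf]
      · simp [List.foldl_cons, pvStepA, pvIsCudaKey, pvIsCudnnKey, hca, hcn, hf,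
              ih, pvCombine_cons_push _ _ _ hf]

theorem pvCombine_none (l : List String) : pvCombine none l = pvSlotA l := by
  simp [pvCombine, pvSlotA, pvFalsy]

-- B's per-slot value as a find? over the filtered stripped values
theorem pvFirstVer_eq (p : String × String → Bool) (labels : List (String × String)) :
    pvFirstVer p labels =
      ((labels.filter p).map (fun kv => PySem.Str.strip kv.2)).find? (fun s => !(s == "")) := by
  induction labels with
  | nil => rfl
  | cons hd tl ih =>
    rw [pvFirstVer] at *
    cases hp : p hd <;> cases hs : PySem.Str.strip hd.2 == "" <;>
      simp [hp, hs, ih]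

-- outside D_, the two per-slot values coincide
theorem pvSlot_eq (l : List String) (h : ¬(l ≠ [] ∧ l.all (fun s => s == ""))) :
    pvSlotA l = l.find? (fun s => !(s == "")) := by
  rw [pvSlotA.eq_def]
  cases hf : l.find? (fun s => !(s == "")) with
  | some s => rfl
  | none =>
    cases l with
    | nil => rfl
    | cons a t =>
      exfalso
      apply h
      refine ⟨by simp, ?_⟩
      rw [List.all_eq_true]
      intro x hx
      have := List.find?_eq_none.mp hf x hx
      simpa using this

-- inside a D_ disjunct, A's slot is some "" while B's is none
theorem pvSlot_diff (l : List String) (hne : l ≠ []) (hall : l.all (fun s => s == "") = true) :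
    pvSlotA l = some "" ∧ l.find? (fun s => !(s == "")) = none := by
  have hf : l.find? (fun s => !(s == "")) = none := by
    rw [List.find?_eq_none]
    intro x hx
    have := List.all_eq_true.mp hall x hx
    simpa using this
  refine ⟨?_, hf⟩
  rw [pvSlotA.eq_def, hf]
  cases l with
  | nil => exact absurd rfl hne
  | cons a t => rfl

theorem pvCudaKey_iff (kv : String × String) : pvIsCudaKey kv = true ↔
    (PySem.Str.isIn "cuda" (PySem.Str.lower kv.1) = true ∧
     PySem.Str.isIn "cudnn" (PySem.Str.lower kv.1) = false) := by
  simp [pvIsCudaKey]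

theorem pvCudnnKey_iff (kv : String × String) : pvIsCudnnKey kv = true ↔
    PySem.Str.isIn "cudnn" (PySem.Str.lower kv.1) = true := by
  simp [pvIsCudnnKey]

theorem pvD_iff (labels : List (String × String)) :
    D_extract_cuda_versions_py labels ↔
      ((labels.filter pvIsCudaKey ≠ [] ∧
         (labels.filter pvIsCudaKey).all (fun kv => PySem.Str.strip kv.2 == "")) ∨
       (labels.filter pvIsCudnnKey ≠ [] ∧
         (labels.filter pvIsCudnnKey).all (fun kv => PySem.Str.strip kv.2 == ""))) := by
  rw [D_extract_cuda_versions_py]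
  have hfa : ∀ (p : String × String → Bool),
      (labels.filter p ≠ [] ↔ ∃ kv ∈ labels, p kv = true) := by
    intro p
    rw [← not_iff_not, not_not, List.filter_eq_nil_iff]
    push Not
    simp
  have hal : ∀ (p : String × String → Bool),
      ((labels.filter p).all (fun kv => PySem.Str.strip kv.2 == "") = true ↔
        ∀ kv ∈ labels, p kv = true → PySem.Str.strip kv.2 = "") := by
    intro p
    rw [List.all_eq_true]
    constructor
    · intro h kv hm hp
      simpa using h kv (List.mem_filter.mpr ⟨hm, hp⟩)
    · intro h kv hm
      rcases List.mem_filter.mp hm with ⟨hm', hp⟩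
      simpa using h kv hm' hp
  rw [hfa, hfa, hal, hal]
  simp only [pvCudaKey_iff, pvCudnnKey_iff, and_imp]

-- ===== VERDICT (by name: the statement is the Claim_ definition above) =====
theorem extract_cuda_versions_py_spec : Claim_unchanged_extract_cuda_versions_py := by
  intro labels _ hD
  show extract_cuda_versions_py labels = extract_cuda_versions_py_alt labels
  rw [pvD_iff] at hD
  push Not at hD
  rw [extract_cuda_versions_py, pvMain, pvCombine_none, pvCombine_none,
      extract_cuda_versions_py_alt, pvFirstVer_eq, pvFirstVer_eq]
  have h1 : ¬((labels.filter pvIsCudaKey).map (fun kv => PySem.Str.strip kv.2) ≠ [] ∧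
      ((labels.filter pvIsCudaKey).map (fun kv => PySem.Str.strip kv.2)).all (fun s => s == "")) := by
    rintro ⟨hne, hall⟩
    rcases hD with ⟨hc, -⟩
    exact absurd (by simpa [List.all_map, Function.comp] using hall)
      (hc (by simpa using hne))
  have h2 : ¬((labels.filter pvIsCudnnKey).map (fun kv => PySem.Str.strip kv.2) ≠ [] ∧
      ((labels.filter pvIsCudnnKey).map (fun kv => PySem.Str.strip kv.2)).all (fun s => s == "")) := by
    rintro ⟨hne, hall⟩
    rcases hD with ⟨-, hc⟩
    exact absurd (by simpa [List.all_map, Function.comp] using hall)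
      (hc (by simpa using hne))
  rw [pvSlot_eq _ h1, pvSlot_eq _ h2]

theorem extract_cuda_versions_py_changed : Claim_changed_extract_cuda_versions_py := by
  unfold Claim_changed_extract_cuda_versions_py; decide

theorem extract_cuda_versions_py_tight : Claim_exact_extract_cuda_versions_py := by
  intro labels _ hD heq
  rw [extract_cuda_versions_py, pvMain, pvCombine_none, pvCombine_none,
      extract_cuda_versions_py_alt, pvFirstVer_eq, pvFirstVer_eq] at heq
  rw [pvD_iff] at hD
  rcases hD with ⟨hne, hall⟩ | ⟨hne, hall⟩
  · have hd := pvSlot_diff ((labels.filter pvIsCudaKey).map (fun kv => PySem.Str.strip kv.2))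
      (by simpa using hne)
      (by simpa [List.all_map, Function.comp] using hall)
    have := congrArg Prod.fst heq
    simp only at this
    rw [hd.1, hd.2] at this
    simp at this
  · have hd := pvSlot_diff ((labels.filter pvIsCudnnKey).map (fun kv => PySem.Str.strip kv.2))
      (by simpa using hne)
      (by simpa [List.all_map, Function.comp] using hall)
    have := congrArg Prod.snd heq
    simp only at this
    rw [hd.1, hd.2] at this
    simp at this
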